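-- pv_equiv track=rewrite | github.com/mpily/bot-tic-tac-toe-competition | markingSchemee.py | checkLeadingDiagonals
-- ===== SOURCE A (Python) =====
-- def checkLeadingDiagonals(Board, required):
--   for a in range(0 , len(Board[0])):
--     temp = []
--     for b in range(0, len(Board)):
--       if b+a < len(Board[0]):
--         if Board[b][b+a] != '0':
--           if len(temp) and Board[b][b+a] == temp[-1]:
--             temp.append(Board[b][b+a])
--           else:
--             temp = []
--             temp.append(Board[b][b+a])
--           if len(temp) == required:
--             return temp[-1]
--   return '0'
-- ===== SOURCE B (Python) =====
-- def _diag_winner(rows, col, width, required, value, count):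
--     """Walk one top-left diagonal (cell = rows[i][col+i]); return the mark whose
--     run of equal non-'0' cells reaches `required`, or None if the diagonal ends
--     (or leaves the board) first."""
--     if not rows or col >= width:
--         return None
--     cell = rows[0][col]
--     if cell != '0':
--         count = count + 1 if cell == value else 1
--         value = cell
--         if count == required:
--             return value
--     return _diag_winner(rows[1:], col + 1, width, required, value, count)
--
--
-- def checkLeadingDiagonals(Board, required):
--     width = len(Board[0])
--     for a in range(width):
--         winner = _diag_winner(Board, a, width, required, None, 0)
--         if winner is not None:
--             return winner
--     return '0'
-- ===== Notes on version B (the rewrite author's own statement) =====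
-- stated objective: alternative
-- what changed: A threads a growing 'temp' run-accumulator list through nested index loops with an in-loop width guard; B walks each diagonal by structural recursion over the rows carrying only the current mark and a run counter, and cuts the walk off as soon as the column leaves the board; Pre_ excludes the empty board and ragged boards, on which the scan hits a missing cell and raises IndexError unless a winning run returns first (B behaves identically there).
-- outside the precondition, e.g. on checkLeadingDiagonals([['X', 'X'], ['X']], 1): A returns 'X', B returns 'X'
import Mathlib
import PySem

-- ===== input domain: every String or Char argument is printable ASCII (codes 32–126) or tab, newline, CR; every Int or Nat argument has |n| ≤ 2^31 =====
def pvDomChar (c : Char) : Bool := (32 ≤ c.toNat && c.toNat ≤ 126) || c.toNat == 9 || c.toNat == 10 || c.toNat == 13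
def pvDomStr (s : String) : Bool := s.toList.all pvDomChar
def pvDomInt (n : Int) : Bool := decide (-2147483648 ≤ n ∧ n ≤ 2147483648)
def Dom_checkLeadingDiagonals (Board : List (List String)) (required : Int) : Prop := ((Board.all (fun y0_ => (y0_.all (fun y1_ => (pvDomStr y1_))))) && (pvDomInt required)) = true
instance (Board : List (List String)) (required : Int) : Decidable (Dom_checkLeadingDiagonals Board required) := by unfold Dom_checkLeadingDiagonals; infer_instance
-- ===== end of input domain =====

-- B replaces A's list-accumulator over nested index loops by a structural recursion over
-- the rows carrying a (mark, run-count) pair, cutting each diagonal walk off at the board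
-- edge (objective: alternative decomposition; similar cost). Equivalence is about return values.

-- ===== PORT A =====
-- Board[b][b+a]; defaults to "" where Python would raise IndexError (excluded by Pre_)
def pvCell (Board : List (List String)) (b a : Int) : String :=
  ((PySem.List.pyGet? Board b).bind (fun row => PySem.List.pyGet? row (b + a))).getD ""

def pvA_inner (Board : List (List String)) (required a : Int) :
    List Int → List String → Option String
  | [], _ => none
  | b :: bs, temp =>
    if b + a < ((Board.headD []).length : Int) then
      let c := pvCell Board b a
      if c ≠ "0" then
        let temp' := if temp.length ≠ 0 ∧ c = temp.getLast! then temp ++ [c] else [c]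
        if (temp'.length : Int) = required then some temp'.getLast!
        else pvA_inner Board required a bs temp'
      else pvA_inner Board required a bs temp
    else pvA_inner Board required a bs temp

def pvA_outer (Board : List (List String)) (required : Int) : List Int → String
  | [] => "0"
  | a :: as_ =>
    match pvA_inner Board required a (PySem.List.pyRange 0 (Board.length : Int) 1) [] with
    | some r => r
    | none => pvA_outer Board required as_

def checkLeadingDiagonals (Board : List (List String)) (required : Int) : String :=
  pvA_outer Board required (PySem.List.pyRange 0 ((Board.headD []).length : Int) 1)

-- ===== PORT B =====
-- _diag_winner: structural recursion over the rows; rows[0][col] defaults to "" where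
-- Python would raise IndexError (excluded by Pre_)
def pvB_diagWinner (required : Int) :
    List (List String) → Int → Int → Option String → Int → Option String
  | [], _, _, _, _ => none
  | row :: rest, col, width, value, count =>
    if col ≥ width then none
    else
      let cell := (PySem.List.pyGet? row col).getD ""
      if cell ≠ "0" then
        let count' := if some cell = value then count + 1 else 1
        if count' = required then some cell
        else pvB_diagWinner required rest (col + 1) width (some cell) count'
      else pvB_diagWinner required rest (col + 1) width value count

def pvB_outer (Board : List (List String)) (width required : Int) : List Int → String
  | [] => "0"
  | a :: as_ =>
    match pvB_diagWinner required Board a width none 0 with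
    | some w => w
    | none => pvB_outer Board width required as_

def checkLeadingDiagonals_alt (Board : List (List String)) (required : Int) : String :=
  pvB_outer Board ((Board.headD []).length : Int) required
    (PySem.List.pyRange 0 ((Board.headD []).length : Int) 1)

-- ===== PRECONDITION & SPEC =====
-- Pre_ excludes the inputs where the scan reaches a missing cell and Python raises
-- IndexError: the empty board (Board[0]) and ragged boards with a row shorter than
-- len(Board[0]) among the first len(Board[0]) rows.  On the few such ragged boards where
-- a winning run returns before the short row is reached, A returns normally and is
-- excluded anyway; B scans the same cells in the same order and returns the same value there.
def Pre_checkLeadingDiagonals (Board : List (List String)) (required : Int) : Prop :=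
  Board ≠ [] ∧ ∀ i : Nat, i < Board.length → i < (Board.headD []).length →
    (Board.headD []).length ≤ (Board.getD i []).length
instance (Board : List (List String)) (required : Int) : Decidable (Pre_checkLeadingDiagonals Board required) := by unfold Pre_checkLeadingDiagonals; infer_instance

def pvWitness_checkLeadingDiagonals : List (List String) × Int :=
  ([["X", "O", "0"], ["0", "X", "O"], ["O", "0", "X"]], 3)

def Spec_checkLeadingDiagonals (Board : List (List String)) (required : Int) (out : String) : Prop := out = checkLeadingDiagonals_alt Board required
instance (Board : List (List String)) (required : Int) (out : String) : Decidable (Spec_checkLeadingDiagonals Board required out) := by unfold Spec_checkLeadingDiagonals; infer_instance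

-- ===== CLAIM (what is proved, stated in full; the proofs are below) =====
def Claim_equal_checkLeadingDiagonals : Prop := ∀ (Board : List (List String)) (required : Int), Dom_checkLeadingDiagonals Board required → Pre_checkLeadingDiagonals Board required → Spec_checkLeadingDiagonals Board required (checkLeadingDiagonals Board required)

-- ===== LEMMAS AND PROOFS =====

-- the invariant relating A's temp list to B's (value, count) state
def pvInv (temp : List String) (value : Option String) (count : Int) : Prop :=
  (temp = [] ∧ value = none ∧ count = 0) ∨
  (∃ (v : String) (c : Nat), value = some v ∧ count = (c : Int) ∧ 1 ≤ c ∧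
    temp = List.replicate c v)

theorem getLast!_replicate_succ (k : Nat) (v : String) :
    (List.replicate (k + 1) v).getLast! = v := by
  rw [List.replicate_succ']
  simp

-- one-step unfoldings of the two ports (definitional)
theorem pvA_inner_cons (Board : List (List String)) (required a b : Int)
    (bs : List Int) (temp : List String) :
    pvA_inner Board required a (b :: bs) temp =
      if b + a < ((Board.headD []).length : Int) then
        if pvCell Board b a ≠ "0" then
          if (((if temp.length ≠ 0 ∧ pvCell Board b a = temp.getLast!
                then temp ++ [pvCell Board b a] else [pvCell Board b a]).length : Int)
              = required)
          then some ((if temp.length ≠ 0 ∧ pvCell Board b a = temp.getLast!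
                then temp ++ [pvCell Board b a] else [pvCell Board b a]).getLast!)
          else pvA_inner Board required a bs
            (if temp.length ≠ 0 ∧ pvCell Board b a = temp.getLast!
              then temp ++ [pvCell Board b a] else [pvCell Board b a])
        else pvA_inner Board required a bs temp
      else pvA_inner Board required a bs temp := rfl

theorem pvB_diagWinner_cons (required : Int) (row : List String)
    (rest : List (List String)) (col width : Int) (value : Option String) (count : Int) :
    pvB_diagWinner required (row :: rest) col width value count =
      if col ≥ width then none
      else
        if (PySem.List.pyGet? row col).getD "" ≠ "0" then
          if (if some ((PySem.List.pyGet? row col).getD "") = value then count + 1 else 1)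
              = required
          then some ((PySem.List.pyGet? row col).getD "")
          else pvB_diagWinner required rest (col + 1) width
            (some ((PySem.List.pyGet? row col).getD ""))
            (if some ((PySem.List.pyGet? row col).getD "") = value then count + 1 else 1)
        else pvB_diagWinner required rest (col + 1) width value count := rfl

-- once the column has left the board, A's remaining iterations do nothing
theorem pvA_inner_none (Board : List (List String)) (required a : Int) :
    ∀ (bs : List Int) (temp : List String),
      (∀ b ∈ bs, ¬ (b + a < ((Board.headD []).length : Int))) →
      pvA_inner Board required a bs temp = none := by
  intro bs
  induction bs with
  | nil => intro temp _; simp [pvA_inner]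
  | cons b bs ih =>
    intro temp h
    rw [pvA_inner_cons, if_neg (h b (by simp))]
    exact ih temp (fun x hx => h x (by simp [hx]))

-- A's inner loop from index k equals B's diagonal walk over the remaining rows
theorem pvInner_eq (Board : List (List String)) (required a : Int) :
    ∀ (rows : List (List String)) (k : Nat), Board.drop k = rows →
      ∀ (temp : List String) (value : Option String) (count : Int),
        pvInv temp value count →
        pvA_inner Board required a (PySem.List.pyRange (k : Int) (Board.length : Int) 1) temp
          = pvB_diagWinner required rows ((k : Int) + a) ((Board.headD []).length : Int)
              value count := by
  intro rows
  induction rows with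
  | nil =>
    intro k hdrop temp value count _
    have hk : Board.length ≤ k := by
      have := congrArg List.length hdrop
      rw [List.length_drop] at this
      simp at this
      omega
    rw [PySem.List.pyRange_one_eq_nil (by exact_mod_cast hk)]
    simp [pvA_inner, pvB_diagWinner]
  | cons row rest ih =>
    intro k hdrop temp value count hinv
    have hk : k < Board.length := by
      have := congrArg List.length hdrop
      rw [List.length_drop] at this
      simp at this
      omega
    have hsplit := (List.drop_eq_getElem_cons hk).symm.trans hdrop
    injection hsplit with hrow hrest
    have hcell : pvCell Board (k : Int) a = (PySem.List.pyGet? row ((k : Int) + a)).getD "" := by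
      simp [pvCell, PySem.List.pyGet?_natCast, List.getElem?_eq_getElem hk, hrow]
    have hk1 : ((k : Int) + 1) = (((k + 1 : Nat)) : Int) := by push_cast; ring
    have hcol1 : (k : Int) + a + 1 = ((k + 1 : Nat) : Int) + a := by push_cast; ring
    rw [PySem.List.pyRange_one_cons (by exact_mod_cast hk), pvA_inner_cons,
      pvB_diagWinner_cons, ← hcell]
    by_cases hw : (k : Int) + a < ((Board.headD []).length : Int)
    · have hwB : ¬ ((k : Int) + a ≥ ((Board.headD []).length : Int)) := by omega
      rw [if_pos hw, if_neg hwB]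
      by_cases hz : pvCell Board (k : Int) a ≠ "0"
      · rw [if_pos hz, if_pos hz]
        set cell := pvCell Board (k : Int) a with hc
        rcases hinv with ⟨ht, hv, hc0⟩ | ⟨v, c, hv, hc0, hc1, ht⟩
        · subst ht hv hc0
          have hnt : ¬ (([] : List String).length ≠ 0 ∧ cell = ([] : List String).getLast!) := by
            simp
          rw [if_neg hnt]
          rw [show (if some cell = none then (0 : Int) + 1 else 1) = 1 by simp]
          by_cases hr : ((1 : Int) = required)
          · have hrA : ((([cell] : List String).length : Int) = required) := by simpa using hr
            rw [if_pos hrA, if_pos hr]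
            simp
          · have hrA : ¬ ((([cell] : List String).length : Int) = required) := by simpa using hr
            rw [if_neg hrA, if_neg hr, hk1, hcol1]
            exact ih (k + 1) hrest [cell] (some cell) 1
              (Or.inr ⟨cell, 1, rfl, by norm_num, le_refl 1, by simp⟩)
        · subst hv hc0 ht
          obtain ⟨c', rfl⟩ : ∃ c', c = c' + 1 := ⟨c - 1, by omega⟩
          have hlast := getLast!_replicate_succ c' v
          by_cases hm : cell = v
          · subst hm
            have hyes : (List.replicate (c' + 1) cell).length ≠ 0 ∧
                cell = (List.replicate (c' + 1) cell).getLast! := ⟨by simp, hlast.symm⟩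
            rw [if_pos hyes, ← List.replicate_succ']
            rw [show (if some cell = some cell then ((c' + 1 : Nat) : Int) + 1 else 1)
                = ((c' + 1 + 1 : Nat) : Int) by push_cast; simp]
            by_cases hr : (((c' + 1 + 1 : Nat) : Int) = required)
            · have hrA : (((List.replicate (c' + 1 + 1) cell).length : Int) = required) := by
                simpa using hr
              rw [if_pos hrA, if_pos hr]
              rw [getLast!_replicate_succ (c' + 1) cell]
            · have hrA : ¬ (((List.replicate (c' + 1 + 1) cell).length : Int) = required) := by
                simpa using hr
              rw [if_neg hrA, if_neg hr, hk1, hcol1]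
              exact ih (k + 1) hrest (List.replicate (c' + 1 + 1) cell) (some cell)
                ((c' + 1 + 1 : Nat) : Int)
                (Or.inr ⟨cell, c' + 1 + 1, rfl, rfl, by omega, rfl⟩)
          · have hno : ¬ ((List.replicate (c' + 1) v).length ≠ 0 ∧
                cell = (List.replicate (c' + 1) v).getLast!) := by
              rw [hlast]
              exact fun h => hm h.2
            rw [if_neg hno]
            rw [show (if some cell = some v then ((c' + 1 : Nat) : Int) + 1 else 1) = 1
                by simp [hm]]
            by_cases hr : ((1 : Int) = required)
            · have hrA : ((([cell] : List String).length : Int) = required) := by simpa using hr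
              rw [if_pos hrA, if_pos hr]
              simp
            · have hrA : ¬ ((([cell] : List String).length : Int) = required) := by
                simpa using hr
              rw [if_neg hrA, if_neg hr, hk1, hcol1]
              exact ih (k + 1) hrest [cell] (some cell) 1
                (Or.inr ⟨cell, 1, rfl, by norm_num, le_refl 1, by simp⟩)
      · rw [if_neg hz, if_neg hz, hk1, hcol1]
        exact ih (k + 1) hrest temp value count hinv
    · have hwB : ((k : Int) + a ≥ ((Board.headD []).length : Int)) := by omega
      rw [if_neg hw, if_pos hwB]
      apply pvA_inner_none
      intro b hb
      have := (PySem.List.mem_pyRange_one.mp hb).1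
      omega

theorem pvOuter_eq (Board : List (List String)) (required : Int) :
    ∀ (as_ : List Int),
      pvA_outer Board required as_ =
        pvB_outer Board ((Board.headD []).length : Int) required as_ := by
  intro as_
  induction as_ with
  | nil => rfl
  | cons a as_ ih =>
    rw [pvA_outer, pvB_outer]
    have h := pvInner_eq Board required a Board 0 (by simp) [] none 0 (Or.inl ⟨rfl, rfl, rfl⟩)
    rw [show ((0 : Nat) : Int) = 0 from rfl, zero_add] at h
    rw [h]
    cases pvB_diagWinner required Board a ((Board.headD []).length : Int) none 0 with
    | none => exact ih
    | some w => rfl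

-- ===== VERDICT (by name: the statement is the Claim_ definition above) =====
theorem checkLeadingDiagonals_spec : Claim_equal_checkLeadingDiagonals := by
  intro Board required _ _
  unfold Spec_checkLeadingDiagonals checkLeadingDiagonals checkLeadingDiagonals_alt
  exact pvOuter_eq Board required _
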